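-- pv_equiv track=rewrite | github.com/csheep131/diogenes | src/diogenes/dpo_audit.py | analyze_difficulty_distribution
-- ===== SOURCE A (Python) =====
-- def analyze_difficulty_distribution(data: list[dict]) -> dict:
--     """Analyze difficulty distribution based on category."""
--     # Categories mapped to difficulty levels
--     difficulty_mapping = {
--         "ignorance": "hard",  # Requires knowing knowledge limits
--         "false_premise": "hard",  # Requires fact-checking
--         "multi_hop": "hard",  # Complex reasoning
--         "ambiguity": "medium",  # Requires clarification
--         "staleness": "medium",  # Time-sensitive
--         "tool_required": "medium",  # External data needed
--         "adversarial": "hard",  # Security awareness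
--         "shallow_trap": "easy",  # Simple but tricky
--     }
--
--     distribution = {"easy": 0, "medium": 0, "hard": 0}
--
--     for item in data:
--         category = item.get("category", "unknown")
--         difficulty = difficulty_mapping.get(category, "medium")
--         distribution[difficulty] += 1
--
--     return distribution
-- ===== SOURCE B (Python) =====
-- _DIFFICULTY_MAPPING = {
--     "ignorance": "hard",
--     "false_premise": "hard",
--     "multi_hop": "hard",
--     "ambiguity": "medium",
--     "staleness": "medium",
--     "tool_required": "medium",
--     "adversarial": "hard",
--     "shallow_trap": "easy",
-- }
--
--
-- def _difficulty(item):
--     return _DIFFICULTY_MAPPING.get(item.get("category", "unknown"), "medium")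
--
--
-- def analyze_difficulty_distribution(data: list[dict]) -> dict:
--     """Analyze difficulty distribution based on category."""
--     return {
--         "easy": sum(1 for item in data if _difficulty(item) == "easy"),
--         "medium": sum(1 for item in data if _difficulty(item) == "medium"),
--         "hard": sum(1 for item in data if _difficulty(item) == "hard"),
--     }
-- ===== Notes on version B (the rewrite author's own statement) =====
-- stated objective: simpler
-- what changed: Replaces the single per-item increment loop over a mutable distribution dict with three independent filtered counts (one per difficulty level) assembled directly into the result dict literal.
import Mathlib
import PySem

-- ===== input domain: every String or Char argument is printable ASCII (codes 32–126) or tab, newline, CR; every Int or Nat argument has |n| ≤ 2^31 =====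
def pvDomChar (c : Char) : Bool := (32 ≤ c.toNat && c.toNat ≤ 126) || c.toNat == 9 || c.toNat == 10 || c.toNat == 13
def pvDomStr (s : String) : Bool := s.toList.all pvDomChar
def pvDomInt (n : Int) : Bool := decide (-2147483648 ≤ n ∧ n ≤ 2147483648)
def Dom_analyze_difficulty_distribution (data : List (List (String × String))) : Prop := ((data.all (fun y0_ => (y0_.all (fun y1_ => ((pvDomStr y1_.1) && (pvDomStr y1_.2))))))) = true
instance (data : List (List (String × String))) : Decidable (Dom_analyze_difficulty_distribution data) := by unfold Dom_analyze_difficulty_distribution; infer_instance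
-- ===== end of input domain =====

-- B replaces A's single per-item increment loop over a mutable distribution dict
-- with three independent filtered counts, one per difficulty level (simpler decomposition).

-- ===== PORT A =====
def difficultyMappingA : PySem.Dict String String :=
  PySem.Dict.ofList [("ignorance", "hard"), ("false_premise", "hard"), ("multi_hop", "hard"),
    ("ambiguity", "medium"), ("staleness", "medium"), ("tool_required", "medium"),
    ("adversarial", "hard"), ("shallow_trap", "easy")]

def analyze_difficulty_distribution (data : List (List (String × String))) : List (String × Int) :=
  (data.foldl
    (fun (distribution : PySem.Dict String Int) item =>
      let category := (PySem.Dict.mk item).getD "category" "unknown"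
      let difficulty := difficultyMappingA.getD category "medium"
      distribution.modify difficulty 0 (· + 1))
    (PySem.Dict.ofList [("easy", 0), ("medium", 0), ("hard", 0)])).items

-- ===== PORT B =====
def difficultyMappingB : PySem.Dict String String :=
  PySem.Dict.ofList [("ignorance", "hard"), ("false_premise", "hard"), ("multi_hop", "hard"),
    ("ambiguity", "medium"), ("staleness", "medium"), ("tool_required", "medium"),
    ("adversarial", "hard"), ("shallow_trap", "easy")]

def difficultyOf (item : List (String × String)) : String :=
  difficultyMappingB.getD ((PySem.Dict.mk item).getD "category" "unknown") "medium"

-- sum(1 for item in data if _difficulty(item) == s)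
def countDifficulty (data : List (List (String × String))) (s : String) : Int :=
  data.foldl (fun acc item => if difficultyOf item == s then acc + 1 else acc) 0

def analyze_difficulty_distribution_alt (data : List (List (String × String))) : List (String × Int) :=
  [("easy", countDifficulty data "easy"),
   ("medium", countDifficulty data "medium"),
   ("hard", countDifficulty data "hard")]

-- ===== PRECONDITION & SPEC =====
def Spec_analyze_difficulty_distribution (data : List (List (String × String))) (out : List (String × Int)) : Prop := out = analyze_difficulty_distribution_alt data
instance (data : List (List (String × String))) (out : List (String × Int)) : Decidable (Spec_analyze_difficulty_distribution data out) := by unfold Spec_analyze_difficulty_distribution; infer_instance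

-- ===== CLAIM (what is proved, stated in full; the proofs are below) =====
def Claim_equal_analyze_difficulty_distribution : Prop := ∀ (data : List (List (String × String))), Dom_analyze_difficulty_distribution data → Spec_analyze_difficulty_distribution data (analyze_difficulty_distribution data)

-- ===== LEMMAS AND PROOFS =====

-- every difficulty A looks up is one of the three bucket keys
lemma difficultyOf_cases (item : List (String × String)) :
    difficultyOf item = "easy" ∨ difficultyOf item = "medium" ∨ difficultyOf item = "hard" := by
  unfold difficultyOf
  have hmk : difficultyMappingB = PySem.Dict.mk
      [("ignorance", "hard"), ("false_premise", "hard"), ("multi_hop", "hard"),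
       ("ambiguity", "medium"), ("staleness", "medium"), ("tool_required", "medium"),
       ("adversarial", "hard"), ("shallow_trap", "easy")] := by decide
  rw [hmk]
  generalize (PySem.Dict.mk item).getD "category" "unknown" = c
  simp only [PySem.Dict.getD_eq_get?_getD, PySem.Dict.get?_mk_cons]
  split_ifs <;> simp [PySem.Dict.get?]

-- A's fold loop components both maps use agree
lemma difficultyMapping_eq : difficultyMappingA = difficultyMappingB := rfl

-- B's running-sum fold equals a countP shifted by its accumulator
lemma countDifficulty_foldl_aux (data : List (List (String × String))) (s : String) (acc : Int) :
    data.foldl (fun acc item => if difficultyOf item == s then acc + 1 else acc) acc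
      = acc + (data.countP (fun item => difficultyOf item == s) : Int) := by
  induction data generalizing acc with
  | nil => simp
  | cons a l ih =>
      simp only [List.foldl_cons, List.countP_cons]
      by_cases h : (difficultyOf a == s) = true
      · rw [if_pos h, ih]; simp [h]; ring
      · rw [if_neg h, ih]; simp [h]

lemma countDifficulty_cons (a : List (String × String)) (l : List (List (String × String))) (s : String) :
    countDifficulty (a :: l) s
      = (if difficultyOf a == s then 1 else 0) + countDifficulty l s := by
  simp only [countDifficulty, List.foldl_cons]
  rw [countDifficulty_foldl_aux, countDifficulty_foldl_aux l s 0]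
  split <;> omega

-- main loop invariant for A's fold over the three-bucket dict
lemma loop_invariant (data : List (List (String × String))) (e m h : Int) :
    data.foldl
      (fun (distribution : PySem.Dict String Int) item =>
        distribution.modify (difficultyMappingA.getD ((PySem.Dict.mk item).getD "category" "unknown") "medium") 0 (· + 1))
      (PySem.Dict.mk [("easy", e), ("medium", m), ("hard", h)])
    = PySem.Dict.mk [("easy", e + countDifficulty data "easy"),
                     ("medium", m + countDifficulty data "medium"),
                     ("hard", h + countDifficulty data "hard")] := by
  induction data generalizing e m h with
  | nil => simp [countDifficulty]
  | cons a l ih =>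
      simp only [List.foldl_cons]
      have hd : difficultyMappingA.getD ((PySem.Dict.mk a).getD "category" "unknown") "medium"
          = difficultyOf a := by rw [difficultyMapping_eq]; rfl
      rw [hd]
      rcases difficultyOf_cases a with hc | hc | hc <;> rw [hc] <;>
        [ (have : (PySem.Dict.mk [("easy", e), ("medium", m), ("hard", h)]).modify "easy" 0 (· + 1)
              = PySem.Dict.mk [("easy", e + 1), ("medium", m), ("hard", h)] := by
              simp [PySem.Dict.modify, PySem.Dict.insert,
                PySem.Dict.contains, PySem.Dict.get?, PySem.Dict.getD]);
          (have : (PySem.Dict.mk [("easy", e), ("medium", m), ("hard", h)]).modify "medium" 0 (· + 1)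
              = PySem.Dict.mk [("easy", e), ("medium", m + 1), ("hard", h)] := by
              simp [PySem.Dict.modify, PySem.Dict.insert,
                PySem.Dict.contains, PySem.Dict.get?, PySem.Dict.getD]);
          (have : (PySem.Dict.mk [("easy", e), ("medium", m), ("hard", h)]).modify "hard" 0 (· + 1)
              = PySem.Dict.mk [("easy", e), ("medium", m), ("hard", h + 1)] := by
              simp [PySem.Dict.modify, PySem.Dict.insert,
                PySem.Dict.contains, PySem.Dict.get?, PySem.Dict.getD])] <;>
        rw [this, ih] <;>
        simp [countDifficulty_cons, hc] <;> ring_nf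

-- ===== VERDICT (by name: the statement is the Claim_ definition above) =====
theorem analyze_difficulty_distribution_spec : Claim_equal_analyze_difficulty_distribution := by
  intro data _
  unfold Spec_analyze_difficulty_distribution analyze_difficulty_distribution analyze_difficulty_distribution_alt
  have h0 : (PySem.Dict.ofList [("easy", (0:Int)), ("medium", 0), ("hard", 0)])
      = PySem.Dict.mk [("easy", 0), ("medium", 0), ("hard", 0)] := rfl
  rw [h0]
  rw [show (fun (distribution : PySem.Dict String Int) item =>
      let category := (PySem.Dict.mk item).getD "category" "unknown"
      let difficulty := difficultyMappingA.getD category "medium"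
      distribution.modify difficulty 0 (· + 1)) =
    (fun (distribution : PySem.Dict String Int) item =>
      distribution.modify (difficultyMappingA.getD ((PySem.Dict.mk item).getD "category" "unknown") "medium") 0 (· + 1)) from rfl]
  rw [loop_invariant]
  simp
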